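-- pv_equiv track=rewrite | github.com/GIL794/Math-Problems-Code-Solutions | Goldbach Conjecture Verifier/goldbach_verifier.py | find_weak_goldbach_partitions
-- ===== SOURCE A (Python) =====
-- def sieve_of_eratosthenes(limit):
--     """
--     Find all prime numbers up to a given limit using the Sieve of Eratosthenes.
--
--     Args:
--         limit: Upper bound for finding primes
--
--     Returns:
--         List of prime numbers up to limit
--     """
--     if limit < 2:
--         return []
--
--     # Create a boolean array where True means the number is prime
--     is_prime = [True] * (limit + 1)
--     is_prime[0] = False
--     is_prime[1] = False
--
--     # Sieve of Eratosthenes algorithm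
--     for i in range(2, int(limit ** 0.5) + 1):
--         if is_prime[i]:
--             # Mark all multiples of i as not prime
--             for j in range(i * i, limit + 1, i):
--                 is_prime[j] = False
--
--     # Collect all primes
--     primes = [i for i in range(2, limit + 1) if is_prime[i]]
--     return primes
--
-- def find_weak_goldbach_partitions(n):
--     """
--     Find all ways to express an odd number as sum of three primes (Weak Goldbach).
--     The weak Goldbach conjecture (now proven) states that every odd number > 5
--     can be expressed as the sum of three odd primes.
--
--     Args:
--         n: Odd number to find prime triple for
--
--     Returns:
--         List of tuples (p1, p2, p3) where p1 + p2 + p3 = n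
--     """
--     if n <= 5 or n % 2 == 0:
--         return []
--
--     primes = sieve_of_eratosthenes(n)
--     primes_set = set(primes)
--     triplets = []
--
--     # Find all triplets where p1 + p2 + p3 = n
--     for i, p1 in enumerate(primes):
--         if p1 > n // 3:
--             break
--         for j in range(i, len(primes)):
--             p2 = primes[j]
--             if p1 + p2 > n - 2:
--                 break
--             p3 = n - p1 - p2
--             if p3 >= p2 and p3 in primes_set:
--                 triplets.append((p1, p2, p3))
--
--     return triplets
-- ===== SOURCE B (Python) =====
-- def sieve_of_eratosthenes(limit):
--     if limit < 2:
--         return []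
--     is_prime = [True] * (limit + 1)
--     is_prime[0] = False
--     is_prime[1] = False
--     for i in range(2, int(limit ** 0.5) + 1):
--         if is_prime[i]:
--             for j in range(i * i, limit + 1, i):
--                 is_prime[j] = False
--     return [i for i in range(2, limit + 1) if is_prime[i]]
--
-- def find_weak_goldbach_partitions(n):
--     if n <= 5 or n % 2 == 0:
--         return []
--     primes = sieve_of_eratosthenes(n)
--     triplets = []
--     for i, p1 in enumerate(primes):
--         if p1 > n // 3:
--             break
--         target = n - p1
--         # two-pointer scan for all prime pairs p2 + p3 = target with p1 <= p2 <= p3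
--         left, right = i, len(primes) - 1
--         while left <= right:
--             s = primes[left] + primes[right]
--             if s < target:
--                 left += 1
--             elif s > target:
--                 right -= 1
--             else:
--                 triplets.append((p1, primes[left], primes[right]))
--                 left += 1
--                 right -= 1
--     return triplets
-- ===== Notes on version B (the rewrite author's own statement) =====
-- stated objective: alternative
-- what changed: The inner scan over p2 with a hash-set lookup for p3 is replaced by a two-pointer scan over the sorted prime list (advance left / retract right until primes[left]+primes[right] = n-p1), eliminating the prime set entirely.
import Mathlib
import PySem

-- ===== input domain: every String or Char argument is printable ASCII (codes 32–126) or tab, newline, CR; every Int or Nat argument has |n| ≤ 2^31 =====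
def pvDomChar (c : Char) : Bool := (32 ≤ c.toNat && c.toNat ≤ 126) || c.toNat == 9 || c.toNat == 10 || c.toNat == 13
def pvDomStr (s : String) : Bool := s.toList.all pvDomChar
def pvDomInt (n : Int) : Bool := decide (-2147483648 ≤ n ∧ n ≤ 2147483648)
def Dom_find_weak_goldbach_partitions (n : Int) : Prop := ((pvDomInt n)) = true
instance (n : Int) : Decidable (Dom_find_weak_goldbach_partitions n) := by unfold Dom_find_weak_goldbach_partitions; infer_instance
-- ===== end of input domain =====

-- B replaces A's inner scan (each p2 with a set lookup for p3) by a two-pointer scan over the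
-- sorted prime list, dropping the prime set entirely (objective: alternative algorithm).

-- ===== PORT A =====
-- shared helper: sieve_of_eratosthenes (identical in Source A and Source B)
def sieve_of_eratosthenes (limit : Int) : List Int :=
  if limit < 2 then []
  else
    -- is_prime = [True] * (limit + 1); is_prime[0] = is_prime[1] = False
    let isp0 : List Bool := List.replicate (limit + 1).toNat true
    let isp1 := PySem.List.pySetD (PySem.List.pySetD isp0 0 false) 1 false
    -- int(limit ** 0.5): exact = isqrt(limit) for 2 ≤ limit ≤ 2^31 (double sqrt is correctly
    -- rounded and the gap to the next square exceeds the ulp there)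
    let r : Int := (Nat.sqrt limit.toNat : Int)
    let isp2 := (PySem.List.pyRange 2 (r + 1) 1).foldl (fun isp i =>
      if PySem.List.pyGetD isp i false = true then
        (PySem.List.pyRange (i * i) (limit + 1) i).foldl
          (fun isp j => PySem.List.pySetD isp j false) isp
      else isp) isp1
    (PySem.List.pyRange 2 (limit + 1) 1).filter (fun i => PySem.List.pyGetD isp2 i false)

-- inner 'for j in range(i, len(primes))' loop of A, with its two breaks
def pvInnerA (n p1 : Int) (primes : List Int) (pset : PySem.Set Int) (j : Nat) :
    List (Int × Int × Int) :=
  if h : j < primes.length then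
    let p2 := primes[j]
    if p1 + p2 > n - 2 then []
    else
      let p3 := n - p1 - p2
      (if p3 ≥ p2 ∧ p3 ∈ pset then [(p1, p2, p3)] else []) ++ pvInnerA n p1 primes pset (j + 1)
  else []
termination_by primes.length - j

-- outer 'for i, p1 in enumerate(primes)' loop of A, with its break
def pvOuterA (n : Int) (primes : List Int) (pset : PySem.Set Int) (i : Nat) :
    List (Int × Int × Int) :=
  if h : i < primes.length then
    let p1 := primes[i]
    if p1 > PySem.Int.floordiv n 3 then []
    else pvInnerA n p1 primes pset i ++ pvOuterA n primes pset (i + 1)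
  else []
termination_by primes.length - i

def find_weak_goldbach_partitions (n : Int) : List (Int × Int × Int) :=
  if n ≤ 5 ∨ PySem.Int.mod n 2 = 0 then []
  else
    let primes := sieve_of_eratosthenes n
    pvOuterA n primes (PySem.Set.ofList primes) 0

-- ===== PORT B =====
-- the 'while left <= right' two-pointer loop of Source B; e = right + 1 (exclusive upper bound)
def pvTwoPtr (primes : List Int) (t : Int) (l e : Nat) : List (Int × Int) :=
  if h : l < e then
    let a := primes.getD l 0
    let b := primes.getD (e - 1) 0
    if a + b < t then pvTwoPtr primes t (l + 1) e
    else if a + b > t then pvTwoPtr primes t l (e - 1)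
    else (a, b) :: pvTwoPtr primes t (l + 1) (e - 1)
  else []
termination_by e - l
decreasing_by all_goals omega

-- outer 'for i, p1 in enumerate(primes)' loop of Source B, with its break
def pvOuterB (n : Int) (primes : List Int) (i : Nat) : List (Int × Int × Int) :=
  if h : i < primes.length then
    let p1 := primes[i]
    if p1 > PySem.Int.floordiv n 3 then []
    else
      (pvTwoPtr primes (n - p1) i primes.length).map (fun pr => (p1, pr.1, pr.2))
        ++ pvOuterB n primes (i + 1)
  else []
termination_by primes.length - i

def find_weak_goldbach_partitions_alt (n : Int) : List (Int × Int × Int) :=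
  if n ≤ 5 ∨ PySem.Int.mod n 2 = 0 then []
  else pvOuterB n (sieve_of_eratosthenes n) 0

-- ===== PRECONDITION & SPEC =====
def Spec_find_weak_goldbach_partitions (n : Int) (out : List (Int × Int × Int)) : Prop := out = find_weak_goldbach_partitions_alt n
instance (n : Int) (out : List (Int × Int × Int)) : Decidable (Spec_find_weak_goldbach_partitions n out) := by unfold Spec_find_weak_goldbach_partitions; infer_instance

-- ===== CLAIM (what is proved, stated in full; the proofs are below) =====
def Claim_equal_find_weak_goldbach_partitions : Prop := ∀ (n : Int), Dom_find_weak_goldbach_partitions n → Spec_find_weak_goldbach_partitions n (find_weak_goldbach_partitions n)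

-- ===== LEMMAS AND PROOFS =====

-- the sieve output is strictly increasing
lemma sieve_sorted (limit : Int) :
    (sieve_of_eratosthenes limit).Pairwise (· < ·) := by
  unfold sieve_of_eratosthenes
  split
  · simp
  · exact (PySem.List.pairwise_lt_pyRange_one 2 (limit + 1)).sublist List.filter_sublist

-- every sieve element is ≥ 2
lemma sieve_two_le (limit : Int) : ∀ x ∈ sieve_of_eratosthenes limit, 2 ≤ x := by
  intro x hx
  unfold sieve_of_eratosthenes at hx
  split at hx
  · simp at hx
  · have := List.mem_of_mem_filter hx
    exact ((PySem.List.mem_pyRange_one).1 this).1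
lemma mem_drop_of_le {primes : List Int} (hs : primes.Pairwise (· < ·)) {i : Nat}
    {x y : Int} (hx : x ∈ primes.drop i) (hy : y ∈ primes) (hxy : x ≤ y) :
    y ∈ primes.drop i := by
  have hsplit : primes.take i ++ primes.drop i = primes := List.take_append_drop i primes
  have h := (List.pairwise_append.1 (by rw [hsplit]; exact hs)).2.2
  rcases List.mem_append.1 (by rw [hsplit]; exact hy) with h1 | h1
  · exact absurd (h y h1 x hx) (not_lt.2 hxy)
  · exact h1

lemma innerA_eq (n p1 : Int) (primes : List Int) (hs : primes.Pairwise (· < ·)) (j : Nat) :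
    pvInnerA n p1 primes (PySem.Set.ofList primes) j
      = ((primes.drop j).filter
          (fun x => decide (p1 + x ≤ n - 2 ∧ n - p1 - x ≥ x ∧ (n - p1 - x) ∈ primes))).map
          (fun x => (p1, x, n - p1 - x)) := by
  have H : ∀ k j, primes.length - j ≤ k →
      pvInnerA n p1 primes (PySem.Set.ofList primes) j
        = ((primes.drop j).filter
            (fun x => decide (p1 + x ≤ n - 2 ∧ n - p1 - x ≥ x ∧ (n - p1 - x) ∈ primes))).map
            (fun x => (p1, x, n - p1 - x)) := by
    intro k
    induction k with
    | zero =>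
      intro j hj
      rw [pvInnerA, dif_neg (by omega), List.drop_eq_nil_of_le (by omega)]
      simp
    | succ k ih =>
      intro j hj
      by_cases h : j < primes.length
      · rw [pvInnerA, dif_pos h]
        have hdrop : primes.drop j = primes[j] :: primes.drop (j + 1) :=
          List.drop_eq_getElem_cons h
        have hpw : (primes.drop j).Pairwise (· < ·) := hs.sublist (List.drop_sublist ..)
        by_cases hbr : p1 + primes[j] > n - 2
        · rw [if_pos hbr]
          symm
          rw [List.map_eq_nil_iff, List.filter_eq_nil_iff]
          intro x hx
          have hge : primes[j] ≤ x := by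
            rw [hdrop] at hx hpw
            rw [List.mem_cons] at hx
            rcases hx with rfl | hx
            · omega
            · exact le_of_lt ((List.pairwise_cons.1 hpw).1 x hx)
          simp only [decide_eq_true_eq]
          omega

        · rw [if_neg hbr]
          rw [ih (j + 1) (by omega)]
          rw [hdrop, List.filter_cons]
          simp only [PySem.Set.mem_ofList, decide_eq_true_eq]
          split_ifs with h1 h2 h2 <;> simp_all
      · rw [pvInnerA, dif_neg h, List.drop_eq_nil_of_le (by omega)]
        simp
  exact H (primes.length - j) j le_rfl

lemma mem_triple_le (a b x : Int) (M : List Int) (haM : ∀ y ∈ M, y < b) (hab : a < b)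
    (hx : x ∈ a :: (M ++ [b])) : x ≤ b := by
  rcases List.mem_cons.1 hx with rfl | h
  · omega
  rcases List.mem_append.1 h with h | h
  · exact le_of_lt (haM _ h)
  · simp at h; omega

lemma tpcase_lt (t a b : Int) (M : List Int) (hab : a < b)
    (haM : ∀ x ∈ M, a < x) (hMb : ∀ x ∈ M, x < b) (hlt : a + b < t) :
    (a :: (M ++ [b])).filter (fun x => decide (x ≤ t - x ∧ (t - x) ∈ a :: (M ++ [b])))
      = (M ++ [b]).filter (fun x => decide (x ≤ t - x ∧ (t - x) ∈ M ++ [b])) := by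
  have hA : ¬ (a ≤ t - a ∧ (t - a) ∈ a :: (M ++ [b])) := by
    rintro ⟨hle, hmem⟩
    have := mem_triple_le a b (t - a) M hMb hab hmem
    omega
  rw [List.filter_cons, if_neg (by simpa using hA)]
  apply List.filter_congr
  intro x hx
  apply decide_eq_decide.2
  constructor
  · rintro ⟨h1, h2⟩
    refine ⟨h1, ?_⟩
    rcases List.mem_cons.1 h2 with h3 | h3
    · exfalso
      rcases List.mem_append.1 hx with hx' | hx'
      · have := haM _ hx'; omega
      · simp at hx'; omega
    · exact h3
  · rintro ⟨h1, h2⟩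
    exact ⟨h1, List.mem_cons_of_mem _ h2⟩

lemma tpcase_gt (t a b : Int) (M : List Int) (hab : a < b)
    (haM : ∀ x ∈ M, a < x) (hMb : ∀ x ∈ M, x < b) (hgt : t < a + b) :
    (a :: (M ++ [b])).filter (fun x => decide (x ≤ t - x ∧ (t - x) ∈ a :: (M ++ [b])))
      = (a :: M).filter (fun x => decide (x ≤ t - x ∧ (t - x) ∈ a :: M)) := by
  have hsplit : a :: (M ++ [b]) = (a :: M) ++ [b] := rfl
  rw [hsplit, List.filter_append]
  have hB : ¬ (b ≤ t - b ∧ (t - b) ∈ (a :: M) ++ [b]) := by rintro ⟨h1, _⟩; omega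
  rw [show List.filter (fun x => decide (x ≤ t - x ∧ (t - x) ∈ (a :: M) ++ [b])) [b] = []
    by rw [List.filter_cons, if_neg (by simpa using hB)]; rfl, List.append_nil]
  apply List.filter_congr
  intro x hx
  have hxa : a ≤ x := by
    rcases List.mem_cons.1 hx with rfl | h
    · exact le_rfl
    · exact le_of_lt (haM _ h)
  apply decide_eq_decide.2
  constructor
  · rintro ⟨h1, h2⟩
    refine ⟨h1, ?_⟩
    rcases List.mem_append.1 h2 with h3 | h3
    · exact h3
    · simp at h3; omega
  · rintro ⟨h1, h2⟩
    exact ⟨h1, List.mem_append_left _ h2⟩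

lemma tpcase_eq (t a b : Int) (M : List Int) (hab : a < b)
    (haM : ∀ x ∈ M, a < x) (hMb : ∀ x ∈ M, x < b) (heq : t = a + b) :
    (a :: (M ++ [b])).filter (fun x => decide (x ≤ t - x ∧ (t - x) ∈ a :: (M ++ [b])))
      = a :: M.filter (fun x => decide (x ≤ t - x ∧ (t - x) ∈ M)) := by
  have hA : a ≤ t - a ∧ (t - a) ∈ a :: (M ++ [b]) := by
    refine ⟨by omega, ?_⟩
    simp only [List.mem_cons, List.mem_append]
    right; right; simp; omega
  rw [List.filter_cons, if_pos (decide_eq_true hA)]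
  congr 1
  rw [List.filter_append]
  have hB : ¬ (b ≤ t - b ∧ (t - b) ∈ a :: (M ++ [b])) := by rintro ⟨h1, _⟩; omega
  rw [show List.filter (fun x => decide (x ≤ t - x ∧ (t - x) ∈ a :: (M ++ [b]))) [b] = []
    by rw [List.filter_cons, if_neg (by simpa using hB)]; rfl, List.append_nil]
  apply List.filter_congr
  intro x hx
  have hx1 := haM _ hx
  have hx2 := hMb _ hx
  apply decide_eq_decide.2
  constructor
  · rintro ⟨h1, h2⟩
    refine ⟨h1, ?_⟩
    rcases List.mem_cons.1 h2 with h3 | h3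
    · omega
    · rcases List.mem_append.1 h3 with h4 | h4
      · exact h4
      · simp at h4; omega
  · rintro ⟨h1, h2⟩
    exact ⟨h1, List.mem_cons_of_mem _ (List.mem_append_left _ h2)⟩

lemma twoPtr_eq (primes : List Int) (hs : primes.Pairwise (· < ·)) (t : Int) :
    ∀ (k l e : Nat), e - l ≤ k → e ≤ primes.length →
    pvTwoPtr primes t l e
      = (((primes.take e).drop l).filter
          (fun x => decide (x ≤ t - x ∧ (t - x) ∈ (primes.take e).drop l))).map
          (fun x => (x, t - x)) := by
  intro k
  induction k with
  | zero =>
    intro l e h1 h2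
    rw [pvTwoPtr, dif_neg (by omega), List.drop_eq_nil_of_le (by simp only [List.length_take]; omega)]
    simp
  | succ k ih =>
    intro l e hk he
    by_cases hle : l < e
    · have hl : l < primes.length := lt_of_lt_of_le hle he
      obtain ⟨e', rfl⟩ : ∃ e', e = e' + 1 := ⟨e - 1, by omega⟩
      have he1 : e' < primes.length := by omega
      have ha : primes.getD l 0 = primes[l] := List.getD_eq_getElem primes 0 hl
      have hb : primes.getD (e' + 1 - 1) 0 = primes[e'] := List.getD_eq_getElem primes 0 he1
      rw [pvTwoPtr, dif_pos hle]
      simp only [ha, hb]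
      by_cases hsing : l + 1 = e' + 1
      · -- window of one element: l = e'
        have hl' : l = e' := by omega
        subst hl'
        have hW : (primes.take (l + 1)).drop l = [primes[l]] := by
          rw [List.drop_eq_getElem_cons (by simp only [List.length_take]; omega)]
          congr 1
          · exact List.getElem_take
          · exact List.drop_eq_nil_of_le (by simp only [List.length_take]; omega)
        rw [hW]
        by_cases h1 : primes[l] + primes[l] < t
        · rw [if_pos h1, ih (l + 1) (l + 1) (by omega) he,
            List.drop_eq_nil_of_le (by simp only [List.length_take]; omega)]
          have hA : ¬ (primes[l] ≤ t - primes[l] ∧ (t - primes[l]) ∈ [primes[l]]) := by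
            rintro ⟨hx, hy⟩; simp at hy; omega
          rw [List.filter_cons, if_neg (by simpa using hA)]
          simp
        · rw [if_neg h1]
          by_cases h2 : primes[l] + primes[l] > t
          · rw [if_pos h2]
            simp only [Nat.add_sub_cancel]
            rw [ih l l (by omega) (by omega),
              List.drop_eq_nil_of_le (by simp only [List.length_take]; omega)]
            have hA : ¬ (primes[l] ≤ t - primes[l] ∧ (t - primes[l]) ∈ [primes[l]]) := by
              rintro ⟨hx, hy⟩; omega
            rw [List.filter_cons, if_neg (by simpa using hA)]
            simp
          · rw [if_neg h2]
            simp only [Nat.add_sub_cancel]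
            rw [ih (l + 1) l (by omega) (by omega),
              List.drop_eq_nil_of_le (by simp only [List.length_take]; omega)]
            have hA : primes[l] ≤ t - primes[l] ∧ (t - primes[l]) ∈ [primes[l]] := by
              constructor
              · omega
              · simp; omega
            rw [List.filter_cons, if_pos (decide_eq_true hA)]
            simp
            omega
      · -- window of at least two elements
        have hll : l + 1 < e' + 1 := by omega
        have htake : primes.take (e' + 1) = primes.take e' ++ [primes[e']] := by
          rw [List.take_add_one, List.getElem?_eq_getElem he1]
          rfl
        have hd2 : (primes.take (e' + 1)).drop (l + 1)
            = (primes.take e').drop (l + 1) ++ [primes[e']] := by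
          rw [htake, List.drop_append_of_le_length (by simp only [List.length_take]; omega)]
        have hd1 : (primes.take (e' + 1)).drop l
            = primes[l] :: ((primes.take e').drop (l + 1) ++ [primes[e']]) := by
          rw [List.drop_eq_getElem_cons (by simp only [List.length_take]; omega), hd2]
          congr 1
          exact List.getElem_take
        have hd3 : (primes.take e').drop l = primes[l] :: (primes.take e').drop (l + 1) := by
          rw [List.drop_eq_getElem_cons (by simp only [List.length_take]; omega)]
          congr 1
          exact List.getElem_take
        have hpwL : (primes[l] :: ((primes.take e').drop (l + 1) ++ [primes[e']])).Pairwise (· < ·) := by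
          rw [← hd1]
          exact hs.sublist ((List.drop_sublist ..).trans (List.take_sublist ..))
        obtain ⟨hhead, htail⟩ := List.pairwise_cons.1 hpwL
        have hab : primes[l] < primes[e'] := hhead _ (by simp)
        have haM : ∀ x ∈ (primes.take e').drop (l + 1), primes[l] < x :=
          fun x hx => hhead x (by simp [hx])
        have hMb : ∀ x ∈ (primes.take e').drop (l + 1), x < primes[e'] :=
          fun x hx => (List.pairwise_append.1 htail).2.2 x hx _ (by simp)
        by_cases h1 : primes[l] + primes[e'] < t
        · rw [if_pos h1, ih (l + 1) (e' + 1) (by omega) he, hd2, hd1,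
            tpcase_lt t _ _ _ hab haM hMb h1]
        · rw [if_neg h1]
          by_cases h2 : primes[l] + primes[e'] > t
          · rw [if_pos h2]
            simp only [Nat.add_sub_cancel]
            rw [ih l e' (by omega) (by omega), hd3, hd1, tpcase_gt t _ _ _ hab haM hMb h2]
          · have heqt : t = primes[l] + primes[e'] := by omega
            rw [if_neg h2]
            simp only [Nat.add_sub_cancel]
            rw [ih (l + 1) e' (by omega) (by omega), hd1, tpcase_eq t _ _ _ hab haM hMb heqt, List.map_cons]
            congr 2
            omega
    · rw [pvTwoPtr, dif_neg hle, List.drop_eq_nil_of_le (by simp only [List.length_take]; omega)]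
      simp

-- the two loop bodies produce the same list for each i
lemma outer_eq (n : Int) (primes : List Int) (hs : primes.Pairwise (· < ·))
    (h2 : ∀ x ∈ primes, 2 ≤ x) :
    ∀ i, pvOuterA n primes (PySem.Set.ofList primes) i = pvOuterB n primes i := by
  have H : ∀ k i, primes.length - i ≤ k →
      pvOuterA n primes (PySem.Set.ofList primes) i = pvOuterB n primes i := by
    intro k
    induction k with
    | zero =>
      intro i hi
      rw [pvOuterA, dif_neg (by omega), pvOuterB, dif_neg (by omega)]
    | succ k ih =>
      intro i hi
      by_cases h : i < primes.length
      · rw [pvOuterA, dif_pos h, pvOuterB, dif_pos h]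
        by_cases hgt : primes[i] > PySem.Int.floordiv n 3
        · rw [if_pos hgt, if_pos hgt]
        · rw [if_neg hgt, if_neg hgt, ih (i + 1) (by omega)]
          congr 1
          rw [innerA_eq n primes[i] primes hs i,
            twoPtr_eq primes hs (n - primes[i]) (primes.length - i) i primes.length
              le_rfl le_rfl, List.take_length, List.map_map]
          simp only [Function.comp_def]
          congr 1
          apply List.filter_congr
          intro x hx
          apply decide_eq_decide.2
          constructor
          · rintro ⟨hA1, hA2, hA3⟩
            exact ⟨by omega, mem_drop_of_le hs hx hA3 (by omega)⟩
          · rintro ⟨hB1, hB2⟩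
            have hmem : n - primes[i] - x ∈ primes := List.mem_of_mem_drop hB2
            have := h2 _ hmem
            exact ⟨by omega, by omega, hmem⟩
      · rw [pvOuterA, dif_neg h, pvOuterB, dif_neg h]
  exact fun i => H (primes.length - i) i le_rfl

-- ===== VERDICT (by name: the statement is the Claim_ definition above) =====
theorem find_weak_goldbach_partitions_spec : Claim_equal_find_weak_goldbach_partitions := by
  intro n _
  unfold Spec_find_weak_goldbach_partitions
  unfold find_weak_goldbach_partitions find_weak_goldbach_partitions_alt
  split
  · rfl
  · exact outer_eq n _ (sieve_sorted n) (sieve_two_le n) 0
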